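-- pv_equiv track=rewrite | github.com/zubayersust/LightOJ-Solve | 1110/1110.py | minim
-- ===== SOURCE A (Python) =====
-- def minim(s1, s2) -> str:
--     if len(s1) > len(s2):
--         return s1
--     if len(s1) < len(s2):
--         return s2
--
--     for i in range(len(s1)):
--         if s1[i] < s2[i]:
--             return s1
--         if s1[i] > s2[i]:
--             return s2
--
--     return s1
-- ===== SOURCE B (Python) =====
-- def minim(s1, s2) -> str:
--     n1, n2 = len(s1), len(s2)
--     if n1 != n2:
--         return s1 if n1 > n2 else s2
--     # binary search for the length of the longest common prefix
--     lo, hi = 0, n1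
--     while lo < hi:
--         mid = (lo + hi + 1) // 2
--         if s1[:mid] == s2[:mid]:
--             lo = mid
--         else:
--             hi = mid - 1
--     if lo == n1:
--         return s1
--     return s1 if s1[lo] < s2[lo] else s2
-- ===== Notes on version B (the rewrite author's own statement) =====
-- stated objective: alternative
-- what changed: Replaces A's per-character decide-inside-the-loop scan with a binary search for the longest common prefix length (testing prefix-slice equality), followed by a single character comparison at that position.
import Mathlib
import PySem

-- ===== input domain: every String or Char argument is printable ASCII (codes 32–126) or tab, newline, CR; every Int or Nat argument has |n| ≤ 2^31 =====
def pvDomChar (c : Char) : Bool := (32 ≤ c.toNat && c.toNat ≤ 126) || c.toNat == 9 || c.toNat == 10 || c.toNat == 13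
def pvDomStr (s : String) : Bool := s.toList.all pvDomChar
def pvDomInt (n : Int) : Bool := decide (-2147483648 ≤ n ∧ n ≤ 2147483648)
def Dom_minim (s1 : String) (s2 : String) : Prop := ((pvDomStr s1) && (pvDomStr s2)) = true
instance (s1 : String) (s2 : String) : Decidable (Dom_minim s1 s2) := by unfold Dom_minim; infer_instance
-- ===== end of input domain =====

-- B decides via a binary search for the longest-common-prefix length (prefix-slice equality)
-- plus one character comparison, instead of A's per-character decide-in-loop scan (objective: alternative).


-- ===== PORT A =====
-- the for-loop: only reached with equal-length strings (the two length branches returned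
-- otherwise), so walking the two character lists in step is exactly 'for i in range(len(s1))'
-- with s1[i], s2[i]; the catch-all returns s1 like the Python fallthrough after the loop.
def minimLoop (s1 s2 : String) : List Char → List Char → String
  | c1 :: t1, c2 :: t2 =>
      if c1 < c2 then s1
      else if c2 < c1 then s2
      else minimLoop s1 s2 t1 t2
  | _, _ => s1

def minim (s1 : String) (s2 : String) : String :=
  if s1.length > s2.length then s1
  else if s1.length < s2.length then s2
  else minimLoop s1 s2 s1.toList s2.toList

-- ===== PORT B =====
-- the while-loop of Source B: binary search on [lo, hi] for the longest m with s1[:m] == s2[:m];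
-- s[:m] with 0 ≤ m is List.take m, and Python's slice '==' is list equality (exact here).
-- hi - lo shrinks by ≥ 1 each iteration, so the initial hi - lo (= n) bounds the iteration
-- count; 'fuel' is that bound, making the recursion structural.
def minimSearch : Nat → List Char → List Char → Nat → Nat → Nat
  | 0, _, _, lo, _ => lo
  | fuel + 1, l1, l2, lo, hi =>
    if lo < hi then
      let mid := (lo + hi + 1) / 2
      if l1.take mid = l2.take mid then minimSearch fuel l1 l2 mid hi
      else minimSearch fuel l1 l2 lo (mid - 1)
    else lo

def minim_alt (s1 : String) (s2 : String) : String :=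
  let n1 := s1.length
  let n2 := s2.length
  if n1 ≠ n2 then (if n1 > n2 then s1 else s2)
  else
    let lo := minimSearch n1 s1.toList s2.toList 0 n1
    if lo = n1 then s1
    else
      -- s1[lo], s2[lo]: here 0 ≤ lo < n1, so indexing never raises; the catch-all is unreachable
      match s1.toList[lo]?, s2.toList[lo]? with
      | some a, some b => if a < b then s1 else s2
      | _, _ => s1

-- ===== PRECONDITION & SPEC =====
def Spec_minim (s1 : String) (s2 : String) (out : String) : Prop := out = minim_alt s1 s2
instance (s1 : String) (s2 : String) (out : String) : Decidable (Spec_minim s1 s2 out) := by unfold Spec_minim; infer_instance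

-- ===== CLAIM (what is proved, stated in full; the proofs are below) =====
def Claim_equal_minim : Prop := ∀ (s1 : String) (s2 : String), Dom_minim s1 s2 → Spec_minim s1 s2 (minim s1 s2)

-- ===== LEMMAS AND PROOFS =====
-- longest-common-prefix length: the specification both sides are reduced to
def pvLcp : List Char → List Char → Nat
  | c1 :: t1, c2 :: t2 => if c1 = c2 then pvLcp t1 t2 + 1 else 0
  | _, _ => 0

theorem pvLcp_le_length : ∀ (l1 l2 : List Char), pvLcp l1 l2 ≤ l1.length := by
  intro l1
  induction l1 with
  | nil => intro l2; cases l2 <;> simp [pvLcp]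
  | cons c1 t1 ih =>
      intro l2
      cases l2 with
      | nil => simp [pvLcp]
      | cons c2 t2 =>
          by_cases h : c1 = c2 <;> simp [pvLcp, h]
          exact ih t2

theorem take_eq_iff_le_pvLcp : ∀ (l1 l2 : List Char), l1.length = l2.length →
    ∀ m, m ≤ l1.length → (l1.take m = l2.take m ↔ m ≤ pvLcp l1 l2) := by
  intro l1
  induction l1 with
  | nil =>
      intro l2 h m hm
      have hm0 : m = 0 := by simpa using hm
      subst hm0
      cases l2 <;> simp [pvLcp]
  | cons c1 t1 ih =>
      intro l2 h m hm
      cases l2 with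
      | nil => simp at h
      | cons c2 t2 =>
          simp only [List.length_cons, Nat.add_right_cancel_iff] at h
          cases m with
          | zero => simp
          | succ k =>
              simp only [List.take_succ_cons, List.cons.injEq, pvLcp]
              by_cases hc : c1 = c2
              · have := ih t2 h k (by simpa using hm)
                simp [hc, this]
              · simp [hc]

theorem minimSearch_eq (l1 l2 : List Char) (h : l1.length = l2.length) :
    ∀ fuel lo hi, hi - lo ≤ fuel → lo ≤ pvLcp l1 l2 → pvLcp l1 l2 ≤ hi → hi ≤ l1.length →
      minimSearch fuel l1 l2 lo hi = pvLcp l1 l2 := by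
  intro fuel
  induction fuel with
  | zero =>
      intro lo hi hf hlo hhi _
      simp only [minimSearch]
      omega
  | succ n ih =>
      intro lo hi hf hlo hhi hn
      simp only [minimSearch]
      by_cases hlt : lo < hi
      · simp only [hlt, if_pos]
        have hmid1 : lo < (lo + hi + 1) / 2 := by omega
        have hmid2 : (lo + hi + 1) / 2 ≤ hi := by omega
        have hiff := take_eq_iff_le_pvLcp l1 l2 h ((lo + hi + 1) / 2) (by omega)
        by_cases ht : l1.take ((lo + hi + 1) / 2) = l2.take ((lo + hi + 1) / 2)
        · have hle : (lo + hi + 1) / 2 ≤ pvLcp l1 l2 := hiff.mp ht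
          simp only [ht, if_pos]
          exact ih _ _ (by omega) hle hhi hn
        · have hgt : ¬ (lo + hi + 1) / 2 ≤ pvLcp l1 l2 := fun hle => ht (hiff.mpr hle)
          simp only [ht, if_neg, not_false_eq_true]
          exact ih _ _ (by omega) hlo (by omega) (by omega)
      · simp only [hlt, if_false]
        omega

theorem minimLoop_eq (s1 s2 : String) :
    ∀ (l1 l2 : List Char), l1.length = l2.length →
      minimLoop s1 s2 l1 l2 =
        (if pvLcp l1 l2 = l1.length then s1
         else match l1[pvLcp l1 l2]?, l2[pvLcp l1 l2]? with
              | some a, some b => if a < b then s1 else s2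
              | _, _ => s1) := by
  intro l1
  induction l1 with
  | nil =>
      intro l2 h
      cases l2 with
      | nil => simp [minimLoop, pvLcp]
      | cons c t => simp at h
  | cons c1 t1 ih =>
      intro l2 h
      cases l2 with
      | nil => simp at h
      | cons c2 t2 =>
          simp only [List.length_cons, Nat.add_right_cancel_iff] at h
          by_cases h12 : c1 < c2
          · have hne : c1 ≠ c2 := ne_of_lt h12
            simp [minimLoop, h12, pvLcp, hne]
          · by_cases h21 : c2 < c1
            · have hne : c1 ≠ c2 := (ne_of_lt h21).symm
              simp [minimLoop, h12, h21, pvLcp, hne, lt_asymm h21]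
            · have he : c1 = c2 := le_antisymm (le_of_not_gt h21) (le_of_not_gt h12)
              simp only [minimLoop, if_neg h12, if_neg h21, pvLcp, if_pos he, ih t2 h,
                List.length_cons, Nat.add_right_cancel_iff, List.getElem?_cons_succ]

theorem minim_eq_alt (s1 s2 : String) : minim s1 s2 = minim_alt s1 s2 := by
  unfold minim minim_alt
  rcases Nat.lt_trichotomy s1.length s2.length with hlt | heq | hgt
  · have h1 : ¬ s1.length > s2.length := by omega
    have hne : s1.length ≠ s2.length := by omega
    simp [hne, h1, hlt]
  · have h1 : ¬ s1.length > s2.length := by omega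
    have h2 : ¬ s1.length < s2.length := by omega
    have hne : ¬ s1.length ≠ s2.length := by omega
    have hl : s1.toList.length = s2.toList.length := by
      simpa [String.length_toList] using heq
    have hk := pvLcp_le_length s1.toList s2.toList
    have hsearch : minimSearch s1.length s1.toList s2.toList 0 s1.length = pvLcp s1.toList s2.toList :=
      minimSearch_eq s1.toList s2.toList hl (s1.length) 0 s1.length
        (by omega) (by omega) (by simpa [String.length_toList] using hk)
        (by simp [String.length_toList])
    simp only [if_neg h1, if_neg h2, hne, ite_false, hsearch, gt_iff_lt, ne_eq,
      not_false_eq_true]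
    rw [minimLoop_eq s1 s2 _ _ hl]
    have hLen : s1.toList.length = s1.length := by simp [String.length_toList]
    rw [hLen]
  · have h1 : s1.length > s2.length := hgt
    have hne : s1.length ≠ s2.length := by omega
    simp [h1, hne]

-- ===== VERDICT (by name: the statement is the Claim_ definition above) =====
theorem minim_spec : Claim_equal_minim := by
  intro s1 s2 _
  exact minim_eq_alt s1 s2
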